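-- pv_equiv track=rewrite | github.com/shuowenwei/LeetCodePython | OutOfBag/Robinhood/margin_call.py | returnExceutedShares
-- ===== SOURCE A (Python) =====
-- import heapq
--
-- def returnExceutedShares(orders):
--     buyMaxHeap, sellMinHeap = [], []
--     executedShares = 0
--     for price, shares, orderType in orders: # Time O(NlogN)
--         price, shares = int(price), int(shares)
--         initShares = shares
--
--         if orderType == 'buy':
--             while shares > 0 and len(sellMinHeap) > 0:
--                 minSellPrice, minSellShares = sellMinHeap[0]
--                 if minSellPrice <= price:
--                     # Check if the sell shares less than or equal to price
--                     heapq.heappop(sellMinHeap)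
--                     if shares < minSellShares:
--                         # Execute all shares and re push remainders into sellMinHeap
--                         heapq.heappush(sellMinHeap, (minSellPrice, minSellShares - shares))
--                         shares = 0
--                     else:
--                         # Execute minSellShares
--                         shares -= minSellShares
--                 else:
--                     # If not, break
--                     break
--             if shares > 0:
--                 heapq.heappush(buyMaxHeap, (-price, shares))
--         else: # orderType == 'sell':
--             while shares > 0 and len(buyMaxHeap) > 0:
--                 maxBuyPrice, maxBuyShares = -buyMaxHeap[0][0], buyMaxHeap[0][1]
--                 if maxBuyPrice >= price:
--                     # Check if the buy shares greater than or equal to price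
--                     heapq.heappop(buyMaxHeap)
--                     if shares < maxBuyShares:
--                         # Execute all shares and re push remainders into buyMaxHeap
--                         heapq.heappush(buyMaxHeap, (-maxBuyPrice, maxBuyShares - shares))
--                         shares = 0
--                     else:
--                         # Execute maxBuyShares
--                         shares -= maxBuyShares
--                 else:
--                     break
--             if shares > 0:
--                 heapq.heappush(sellMinHeap, (price, shares))
--         executedShares += (initShares - shares)
--     return executedShares
-- ===== SOURCE B (Python) =====
-- def returnExceutedShares(orders):
--     buys, sells = {}, {}
--     executed = 0
--     for price, shares, orderType in orders:
--         price, shares = int(price), int(shares)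
--         remaining = shares
--         if orderType == 'buy':
--             while remaining > 0 and sells:
--                 p = min(sells)
--                 if p > price:
--                     break
--                 avail = sells[p]
--                 if remaining < avail:
--                     sells[p] = avail - remaining
--                     remaining = 0
--                     break
--                 del sells[p]
--                 remaining -= avail
--             if remaining > 0:
--                 buys[price] = buys.get(price, 0) + remaining
--         else:
--             while remaining > 0 and buys:
--                 p = max(buys)
--                 if p < price:
--                     break
--                 avail = buys[p]
--                 if remaining < avail:
--                     buys[p] = avail - remaining
--                     remaining = 0
--                     break
--                 del buys[p]
--                 remaining -= avail
--             if remaining > 0: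
--                 sells[price] = sells.get(price, 0) + remaining
--         executed += shares - remaining
--     return executed
-- ===== Notes on version B (the rewrite author's own statement) =====
-- stated objective: alternative
-- what changed: Replaces the two heaps of individual resting orders by dicts of aggregated price levels (price -> total resting shares): matching repeatedly takes the best acceptable level via min/max over the keys and consumes or shrinks whole levels, instead of popping and re-pushing per-order heap entries.
import Mathlib
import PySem

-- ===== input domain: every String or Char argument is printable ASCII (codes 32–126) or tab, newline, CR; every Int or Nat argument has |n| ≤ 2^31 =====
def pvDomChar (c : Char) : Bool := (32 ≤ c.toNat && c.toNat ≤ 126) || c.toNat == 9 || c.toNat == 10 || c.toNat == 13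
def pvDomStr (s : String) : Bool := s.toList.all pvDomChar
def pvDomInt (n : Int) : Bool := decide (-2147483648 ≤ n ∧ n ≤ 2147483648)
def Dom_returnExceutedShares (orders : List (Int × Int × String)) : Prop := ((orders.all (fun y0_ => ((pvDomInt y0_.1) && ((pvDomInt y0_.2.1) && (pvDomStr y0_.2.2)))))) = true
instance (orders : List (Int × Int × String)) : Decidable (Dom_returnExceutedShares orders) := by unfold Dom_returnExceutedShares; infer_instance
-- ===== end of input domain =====

-- B replaces A's heaps of individual resting orders by dicts of aggregated price levels; alternative
-- decomposition (not claimed faster). Both are total; A's int(price)/int(shares) on ints are identity.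

-- ===== PORT A =====
-- heapq is modelled by its observable behaviour (heap[0] = least element, heappop removes it,
-- heappush adds one) as a list kept sorted by Python's lexicographic tuple order: exact for
-- int-pair heaps, where the order is total.
def pvLexLe (a b : Int × Int) : Bool := decide (a.1 < b.1 ∨ (a.1 = b.1 ∧ a.2 ≤ b.2))

def pvHpush (h : List (Int × Int)) (x : Int × Int) : List (Int × Int) :=
  match h with
  | [] => [x]
  | y :: t => if pvLexLe x y then x :: y :: t else y :: pvHpush t x

-- the inner 'while' of a buy order, consuming sellMinHeap
def pvBuyLoop (shares : Int) (sellMinHeap : List (Int × Int)) (price : Int) :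
    Int × List (Int × Int) :=
  if shares > 0 then
    match sellMinHeap with
    | [] => (shares, [])
    | (minSellPrice, minSellShares) :: t =>
      if minSellPrice ≤ price then
        if shares < minSellShares then (0, pvHpush t (minSellPrice, minSellShares - shares))
        else pvBuyLoop (shares - minSellShares) t price
      else (shares, (minSellPrice, minSellShares) :: t)
  else (shares, sellMinHeap)

-- the inner 'while' of a sell order, consuming buyMaxHeap (entries are (-price, shares))
def pvSellLoop (shares : Int) (buyMaxHeap : List (Int × Int)) (price : Int) :
    Int × List (Int × Int) :=
  if shares > 0 then
    match buyMaxHeap with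
    | [] => (shares, [])
    | (np, maxBuyShares) :: t =>
      if -np ≥ price then
        if shares < maxBuyShares then (0, pvHpush t (-(-np), maxBuyShares - shares))
        else pvSellLoop (shares - maxBuyShares) t price
      else (shares, (np, maxBuyShares) :: t)
  else (shares, buyMaxHeap)

-- the body of A's 'for' loop, over the state (buyMaxHeap, sellMinHeap, executedShares)
def pvStepA (st : List (Int × Int) × List (Int × Int) × Int) (o : Int × Int × String) :
    List (Int × Int) × List (Int × Int) × Int :=
  let buyMaxHeap := st.1
  let sellMinHeap := st.2.1
  let executedShares := st.2.2
  let price := o.1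
  let shares := o.2.1
  let orderType := o.2.2
  let initShares := shares
  if orderType == "buy" then
    let r := pvBuyLoop shares sellMinHeap price
    let buyMaxHeap' := if r.1 > 0 then pvHpush buyMaxHeap (-price, r.1) else buyMaxHeap
    (buyMaxHeap', r.2, executedShares + (initShares - r.1))
  else
    let r := pvSellLoop shares buyMaxHeap price
    let sellMinHeap' := if r.1 > 0 then pvHpush sellMinHeap (price, r.1) else sellMinHeap
    (r.2, sellMinHeap', executedShares + (initShares - r.1))

def returnExceutedShares (orders : List (Int × Int × String)) : Int :=
  (orders.foldl pvStepA ([], [], 0)).2.2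

-- ===== PORT B =====
-- termination helper for the level-consuming loops: erasing a present key shrinks the dict
theorem pvSizeEraseLt (d : PySem.Dict Int Int) (k : Int) (hk : k ∈ d.keys) :
    (d.erase k).size < d.size := by
  have : ∃ p ∈ d.items, ¬ ((!p.1 == k) = true) := by
    rcases List.mem_map.mp hk with ⟨p, hp, hk⟩
    exact ⟨p, hp, by simp [hk]⟩
  simpa [PySem.Dict.erase, PySem.Dict.size] using List.length_filter_lt_length_iff_exists.mpr this

-- the 'while' of a buy order against the aggregated sell book (price -> total shares)
def pvFillBuy (remaining limit : Int) (sells : PySem.Dict Int Int) :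
    Int × PySem.Dict Int Int :=
  if hg : remaining > 0 ∧ sells.size ≠ 0 then
    match hm : PySem.List.min? sells.keys (fun k => k) with
    | none => (remaining, sells)   -- unreachable: the book is nonempty here
    | some p =>
      if p > limit then (remaining, sells)
      else
        let avail := sells.getD p 0
        if remaining < avail then (0, sells.insert p (avail - remaining))
        else pvFillBuy (remaining - avail) limit (sells.erase p)
  else (remaining, sells)
termination_by sells.size
decreasing_by exact pvSizeEraseLt _ _ (PySem.List.min?_mem hm)

-- the 'while' of a sell order against the aggregated buy book
def pvFillSell (remaining limit : Int) (buys : PySem.Dict Int Int) :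
    Int × PySem.Dict Int Int :=
  if hg : remaining > 0 ∧ buys.size ≠ 0 then
    match hm : PySem.List.max? buys.keys (fun k => k) with
    | none => (remaining, buys)   -- unreachable: the book is nonempty here
    | some p =>
      if p < limit then (remaining, buys)
      else
        let avail := buys.getD p 0
        if remaining < avail then (0, buys.insert p (avail - remaining))
        else pvFillSell (remaining - avail) limit (buys.erase p)
  else (remaining, buys)
termination_by buys.size
decreasing_by exact pvSizeEraseLt _ _ (PySem.List.max?_mem hm)

-- the body of B's 'for' loop, over the state (buys, sells, executed)
def pvStepB (st : PySem.Dict Int Int × PySem.Dict Int Int × Int) (o : Int × Int × String) :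
    PySem.Dict Int Int × PySem.Dict Int Int × Int :=
  let buys := st.1
  let sells := st.2.1
  let executed := st.2.2
  let price := o.1
  let shares := o.2.1
  let orderType := o.2.2
  if orderType == "buy" then
    let r := pvFillBuy shares price sells
    let buys' := if r.1 > 0 then buys.insert price (buys.getD price 0 + r.1) else buys
    (buys', r.2, executed + (shares - r.1))
  else
    let r := pvFillSell shares price buys
    let sells' := if r.1 > 0 then sells.insert price (sells.getD price 0 + r.1) else sells
    (r.2, sells', executed + (shares - r.1))

def returnExceutedShares_alt (orders : List (Int × Int × String)) : Int :=
  (orders.foldl pvStepB (PySem.Dict.empty, PySem.Dict.empty, 0)).2.2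

-- ===== PRECONDITION & SPEC =====
def Spec_returnExceutedShares (orders : List (Int × Int × String)) (out : Int) : Prop := out = returnExceutedShares_alt orders
instance (orders : List (Int × Int × String)) (out : Int) : Decidable (Spec_returnExceutedShares orders out) := by unfold Spec_returnExceutedShares; infer_instance

-- ===== CLAIM (what is proved, stated in full; the proofs are below) =====
def Claim_equal_returnExceutedShares : Prop := ∀ (orders : List (Int × Int × String)), Dom_returnExceutedShares orders → Spec_returnExceutedShares orders (returnExceutedShares orders)

-- ===== LEMMAS AND PROOFS =====

-- total shares resting in a heap at a given heap key
def pvAgg (h : List (Int × Int)) (p : Int) : Int :=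
  (h.map (fun e => if e.1 = p then e.2 else 0)).sum

-- heap invariants
def pvSorted (h : List (Int × Int)) : Prop :=
  h.Pairwise (fun a b => pvLexLe a b = true)
def pvPos (h : List (Int × Int)) : Prop := ∀ e ∈ h, 0 < e.2

-- dict invariants
def pvWfD (d : PySem.Dict Int Int) : Prop :=
  d.keys.Nodup ∧ ∀ kv ∈ d.items, 0 < kv.2

-- the aggregation relation: heap keys against dict keys, through a key transform σ
-- (σ = id for the sell book; σ = negation for the buy book, whose heap stores -price)
def pvRel (σ : Int → Int) (h : List (Int × Int)) (d : PySem.Dict Int Int) : Prop :=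
  (∀ p, pvAgg h (σ p) = d.getD p 0) ∧ (∀ p, p ∈ d.keys ↔ pvAgg h (σ p) ≠ 0)


theorem pvAgg_nil (p : Int) : pvAgg [] p = 0 := rfl

theorem pvAgg_cons (e : Int × Int) (t : List (Int × Int)) (p : Int) :
    pvAgg (e :: t) p = (if e.1 = p then e.2 else 0) + pvAgg t p := by
  simp [pvAgg]

theorem pvAgg_nonneg (h : List (Int × Int)) (p : Int) (hp : pvPos h) : 0 ≤ pvAgg h p := by
  induction h with
  | nil => simp [pvAgg_nil]
  | cons e t ih =>
    have hs := hp e (by simp)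
    have ht := ih (fun e he => hp e (by simp [he]))
    rw [pvAgg_cons]
    split_ifs <;> omega

theorem pvAgg_eq_zero_of_not_mem (h : List (Int × Int)) (p : Int)
    (hn : ∀ e ∈ h, e.1 ≠ p) : pvAgg h p = 0 := by
  induction h with
  | nil => rfl
  | cons e t ih =>
    rw [pvAgg_cons, if_neg (hn e (by simp)), ih (fun e he => hn e (by simp [he]))]
    ring

theorem pvExists_of_agg_ne_zero (h : List (Int × Int)) (p : Int) (hne : pvAgg h p ≠ 0) :
    ∃ e ∈ h, e.1 = p := by
  by_contra hc
  push_neg at hc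
  exact hne (pvAgg_eq_zero_of_not_mem h p hc)

theorem pvMem_hpush (h : List (Int × Int)) (x e : Int × Int) :
    e ∈ pvHpush h x ↔ e ∈ h ∨ e = x := by
  induction h with
  | nil => simp [pvHpush]
  | cons y t ih =>
    simp only [pvHpush]
    split_ifs <;> simp [ih] <;> tauto

theorem pvLexLe_total (a b : Int × Int) (hn : ¬ pvLexLe a b = true) : pvLexLe b a = true := by
  simp [pvLexLe] at *
  omega

theorem pvSorted_hpush (h : List (Int × Int)) (x : Int × Int) (hs : pvSorted h) :
    pvSorted (pvHpush h x) := by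
  induction h with
  | nil => simp [pvHpush, pvSorted]
  | cons y t ih =>
    rw [pvSorted, List.pairwise_cons] at hs
    simp only [pvHpush]
    split_ifs with hle
    · rw [pvSorted, List.pairwise_cons]
      refine ⟨?_, List.Pairwise.cons hs.1 hs.2⟩
      intro e he
      rw [List.mem_cons] at he
      rcases he with he | he
      · rw [he]; exact hle
      · have := hs.1 e he
        simp [pvLexLe] at *
        omega
    · rw [pvSorted, List.pairwise_cons]
      refine ⟨?_, ih hs.2⟩
      intro e he
      rw [pvMem_hpush] at he
      rcases he with he | he
      · exact hs.1 e he
      · rw [he]; exact pvLexLe_total x y hle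

theorem pvPos_hpush (h : List (Int × Int)) (x : Int × Int) (hp : pvPos h) (hx : 0 < x.2) :
    pvPos (pvHpush h x) := by
  intro e he
  rw [pvMem_hpush] at he
  rcases he with he | he
  · exact hp e he
  · rw [he]; exact hx

theorem pvAgg_hpush (h : List (Int × Int)) (x : Int × Int) (p : Int) :
    pvAgg (pvHpush h x) p = pvAgg h p + (if x.1 = p then x.2 else 0) := by
  induction h with
  | nil => simp [pvHpush, pvAgg]
  | cons y t ih =>
    simp only [pvHpush]
    by_cases hle : pvLexLe x y = true
    · rw [if_pos hle, pvAgg_cons]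
      ring
    · rw [if_neg hle, pvAgg_cons, ih, pvAgg_cons]
      ring

def pvRemove (h : List (Int × Int)) (p0 : Int) : List (Int × Int) :=
  h.filter (fun e => decide (e.1 ≠ p0))

theorem pvRemove_nil (p0 : Int) : pvRemove [] p0 = [] := rfl

theorem pvRemove_cons (e : Int × Int) (t : List (Int × Int)) (p0 : Int) :
    pvRemove (e :: t) p0 = if e.1 = p0 then pvRemove t p0 else e :: pvRemove t p0 := by
  by_cases hq : e.1 = p0 <;> simp [pvRemove, List.filter_cons, hq]

theorem pvAgg_remove (h : List (Int × Int)) (p0 p : Int) :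
    pvAgg (pvRemove h p0) p = if p = p0 then 0 else pvAgg h p := by
  induction h with
  | nil => simp [pvRemove_nil, pvAgg_nil]
  | cons e t ih =>
    rw [pvRemove_cons]
    by_cases hq : e.1 = p0
    · rw [if_pos hq, ih]
      by_cases hp : p = p0
      · simp [hp]
      · rw [if_neg hp, if_neg hp, pvAgg_cons, if_neg (by omega)]
        ring
    · rw [if_neg hq, pvAgg_cons, ih, pvAgg_cons]
      by_cases hp : p = p0
      · rw [if_pos hp, if_pos hp, if_neg (by omega)]
        ring
      · simp [hp]

theorem pvSorted_remove (h : List (Int × Int)) (p0 : Int) (hs : pvSorted h) :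
    pvSorted (pvRemove h p0) := List.Pairwise.sublist List.filter_sublist hs

theorem pvPos_remove (h : List (Int × Int)) (p0 : Int) (hp : pvPos h) :
    pvPos (pvRemove h p0) := fun e he => hp e (List.mem_of_mem_filter he)

theorem pvSorted_cons_iff (e : Int × Int) (t : List (Int × Int)) :
    pvSorted (e :: t) ↔ (∀ f ∈ t, pvLexLe e f = true) ∧ pvSorted t := by
  simp [pvSorted, List.pairwise_cons]

theorem pvAgg_pos_of_mem (t : List (Int × Int)) (e : Int × Int) (p : Int)
    (hp : pvPos t) (he : e ∈ t) (hep : e.1 = p) : 0 < pvAgg t p := by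
  induction t with
  | nil => simp at he
  | cons f t ih =>
    have hf := hp f (by simp)
    have hnn := pvAgg_nonneg t p (fun x hx => hp x (by simp [hx]))
    rw [pvAgg_cons]
    rw [List.mem_cons] at he
    rcases he with he | he
    · subst he; rw [if_pos hep]; omega
    · have := ih (fun x hx => hp x (by simp [hx])) he
      split_ifs <;> omega

theorem pvRemove_eq_self (t : List (Int × Int)) (p0 : Int) (hn : ∀ e ∈ t, e.1 ≠ p0) :
    pvRemove t p0 = t :=
  List.filter_eq_self.mpr (fun e he => by simp [hn e he])

theorem pvBuyLoop_nonpos (shares : Int) (h : List (Int × Int)) (limit : Int)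
    (hs : shares ≤ 0) : pvBuyLoop shares h limit = (shares, h) := by
  rw [pvBuyLoop.eq_def, if_neg (by omega)]

theorem pvSorted_head_min (y : Int × Int) (t : List (Int × Int))
    (hs : pvSorted (y :: t)) : ∀ e ∈ t, y.1 ≤ e.1 := by
  rw [pvSorted, List.pairwise_cons] at hs
  intro e he
  have := hs.1 e he
  simp [pvLexLe] at this
  omega

theorem pvBuyLoop_step (shares s0 p0 limit : Int) (t : List (Int × Int))
    (hpos : 0 < shares) (hacc : p0 ≤ limit) :
    pvBuyLoop shares ((p0, s0) :: t) limit =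
      if shares < s0 then (0, pvHpush t (p0, s0 - shares))
      else pvBuyLoop (shares - s0) t limit := by
  rw [pvBuyLoop.eq_def]
  simp only [gt_iff_lt, hpos, if_true, hacc, ite_true]

theorem pvBuyLoop_reject (shares s0 p0 limit : Int) (t : List (Int × Int))
    (hpos : 0 < shares) (hacc : ¬ p0 ≤ limit) :
    pvBuyLoop shares ((p0, s0) :: t) limit = (shares, (p0, s0) :: t) := by
  rw [pvBuyLoop.eq_def]
  simp only [gt_iff_lt, hpos, if_true, hacc, ite_false]

theorem pvBuyLoop_nil (shares limit : Int) : pvBuyLoop shares [] limit = (shares, []) := by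
  rw [pvBuyLoop.eq_def]
  split_ifs <;> rfl

theorem pvBuyLoop_block (h : List (Int × Int)) (p0 limit : Int)
    (hs : pvSorted h) (hp : pvPos h) (hmin : ∀ e ∈ h, p0 ≤ e.1) (hacc : p0 ≤ limit) :
    ∀ shares : Int, 0 < shares →
    (pvAgg h p0 ≤ shares →
      pvBuyLoop shares h limit = pvBuyLoop (shares - pvAgg h p0) (pvRemove h p0) limit) ∧
    (shares < pvAgg h p0 →
      ∃ h', pvBuyLoop shares h limit = (0, h') ∧ pvSorted h' ∧ pvPos h' ∧
        pvAgg h' p0 = pvAgg h p0 - shares ∧ ∀ q, q ≠ p0 → pvAgg h' q = pvAgg h q) := by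
  induction h with
  | nil =>
    intro shares _
    constructor
    · intro _; rw [pvAgg_nil, pvRemove_nil, sub_zero]
    · intro hlt; rw [pvAgg_nil] at hlt; omega
  | cons e t ih =>
    obtain ⟨q0, s0⟩ := e
    intro shares hpos
    have hcons := (pvSorted_cons_iff (q0, s0) t).mp hs
    have hq0min : ∀ f ∈ t, q0 ≤ f.1 := pvSorted_head_min (q0, s0) t hs
    have hst : pvSorted t := hcons.2
    have hpt : pvPos t := fun f hf => hp f (by simp [hf])
    have hs0 : 0 < s0 := hp (q0, s0) (by simp)
    have hTt0 : 0 ≤ pvAgg t p0 := pvAgg_nonneg t p0 hpt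
    by_cases hq : q0 = p0
    · subst hq
      have hT : pvAgg ((q0, s0) :: t) q0 = s0 + pvAgg t q0 := by
        rw [pvAgg_cons, if_pos rfl]
      by_cases hlt : shares < s0
      · constructor
        · intro hle; omega
        · intro _
          refine ⟨pvHpush t (q0, s0 - shares),
            by rw [pvBuyLoop_step _ _ _ _ _ hpos hacc, if_pos hlt],
            pvSorted_hpush t _ hst, pvPos_hpush t _ hpt (by simpa using by omega), ?_, ?_⟩
          · rw [pvAgg_hpush, hT, if_pos rfl]
            ring
          · intro q hqne
            rw [pvAgg_hpush, pvAgg_cons]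
            rw [if_neg (by simpa using (fun h => hqne h.symm)),
              if_neg (by simpa using (fun h => hqne h.symm))]
            ring
      · rw [pvBuyLoop_step _ _ _ _ _ hpos hacc, if_neg hlt]
        by_cases hz : shares - s0 ≤ 0
        · have hz' : shares = s0 := by omega
          constructor
          · intro hle
            have haggt : pvAgg t q0 = 0 := by omega
            have hnot : ∀ f ∈ t, f.1 ≠ q0 := by
              intro f hf hf1
              have := pvAgg_pos_of_mem t f q0 hpt hf hf1
              omega
            rw [pvBuyLoop_nonpos _ _ _ (by omega), pvBuyLoop_nonpos _ _ _ (by omega),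
              pvRemove_cons, if_pos rfl, pvRemove_eq_self t q0 hnot]
            have hTs : pvAgg ((q0, s0) :: t) q0 = s0 := by omega
            rw [hTs]
          · intro hlt2
            refine ⟨t, ?_, hst, hpt, by omega, ?_⟩
            · rw [pvBuyLoop_nonpos _ _ _ (by omega), hz', sub_self]
            · intro q hqne
              rw [pvAgg_cons, if_neg (by simpa using (fun h => hqne h.symm))]
              ring
        · have ihh := ih hst hpt hq0min (shares - s0) (by omega)
          constructor
          · intro hle
            rw [ihh.1 (by omega), pvRemove_cons, if_pos rfl]
            congr 1
            rw [hT]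
            ring
          · intro hlt2
            obtain ⟨h', heq, hs', hp', hagg', hother'⟩ := ihh.2 (by omega)
            refine ⟨h', heq, hs', hp', by omega, ?_⟩
            intro q hqne
            rw [hother' q hqne, pvAgg_cons, if_neg (by simpa using (fun h => hqne h.symm))]
            ring
    · have hT : pvAgg ((q0, s0) :: t) p0 = 0 := by
        apply pvAgg_eq_zero_of_not_mem
        intro f hf
        rw [List.mem_cons] at hf
        rcases hf with hf | hf
        · rw [hf]; exact hq
        · have h1 := hq0min f hf
          have h2 := hmin (q0, s0) (by simp)
          intro hc
          have : q0 = p0 := by simp at h2 ⊢; omega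
          exact hq this
      constructor
      · intro _
        rw [hT, sub_zero, pvRemove_eq_self]
        intro f hf
        rw [List.mem_cons] at hf
        rcases hf with hf | hf
        · rw [hf]; exact hq
        · have h1 := hq0min f hf
          have h2 := hmin (q0, s0) (by simp)
          intro hc
          exact hq (by simp at h2 ⊢; omega)
      · intro hlt; omega

theorem pvGet?_erase (d : PySem.Dict Int Int) (k q : Int) :
    (d.erase k).get? q = if q = k then none else d.get? q := by
  obtain ⟨l⟩ := d
  induction l with
  | nil =>
    show (PySem.Dict.mk []).get? q = _
    split_ifs <;> rfl
  | cons p l ih =>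
    obtain ⟨a, v⟩ := p
    by_cases hk : a = k
    · have he : (PySem.Dict.mk ((a, v) :: l)).erase k = (PySem.Dict.mk l).erase k := by
        simp [PySem.Dict.erase, List.filter_cons, hk]
      rw [he, ih, PySem.Dict.get?_mk_cons]
      by_cases hqk : q = k
      · rw [if_pos hqk, if_pos hqk]
      · rw [if_neg hqk, if_neg hqk, if_neg (by simp [hk]; omega)]
    · have he : (PySem.Dict.mk ((a, v) :: l)).erase k =
          PySem.Dict.mk ((a, v) :: ((PySem.Dict.mk l).erase k).items) := by
        simp [PySem.Dict.erase, List.filter_cons, hk]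
      have hrec : (PySem.Dict.mk ((PySem.Dict.mk l).erase k).items).get? q =
          ((PySem.Dict.mk l).erase k).get? q := rfl
      rw [he, PySem.Dict.get?_mk_cons]
      by_cases haq : a = q
      · have hqk : ¬ q = k := fun hc => hk (haq.trans hc)
        rw [if_pos (by simp [haq]), if_neg hqk, PySem.Dict.get?_mk_cons,
          if_pos (by simp [haq])]
      · rw [if_neg (by simp [haq]), hrec, ih, PySem.Dict.get?_mk_cons]
        by_cases hqk : q = k
        · rw [if_pos hqk, if_pos hqk]
        · rw [if_neg hqk, if_neg hqk, if_neg (by simp [haq])]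

theorem pvGetD_erase (d : PySem.Dict Int Int) (k q : Int) :
    (d.erase k).getD q 0 = if q = k then 0 else d.getD q 0 := by
  rw [PySem.Dict.getD_eq_get?_getD, PySem.Dict.getD_eq_get?_getD, pvGet?_erase]
  split_ifs <;> rfl

theorem pvKeys_erase (d : PySem.Dict Int Int) (k : Int) :
    (d.erase k).keys = d.keys.filter (fun x => !(x == k)) := by
  obtain ⟨l⟩ := d
  show (l.filter (fun p => !(p.1 == k))).map Prod.fst = (l.map Prod.fst).filter (fun x => !(x == k))
  induction l with
  | nil => rfl
  | cons p l ih =>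
    rw [List.filter_cons, List.map_cons, List.filter_cons]
    by_cases hk : p.1 = k
    · rw [if_neg (by simp [hk]), ih, if_neg (by simp [hk])]
    · rw [if_pos (by simp [hk]), List.map_cons, ih, if_pos (by simp [hk])]

theorem pvMem_keys_erase (d : PySem.Dict Int Int) (k q : Int) :
    q ∈ (d.erase k).keys ↔ q ∈ d.keys ∧ q ≠ k := by
  rw [pvKeys_erase, List.mem_filter]
  simp

theorem pvWfD_erase (d : PySem.Dict Int Int) (k : Int) (hw : pvWfD d) :
    pvWfD (d.erase k) := by
  constructor
  · rw [pvKeys_erase]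
    exact List.Nodup.filter _ hw.1
  · intro kv hkv
    exact hw.2 kv (List.mem_of_mem_filter hkv)

theorem pvSize_zero_iff (d : PySem.Dict Int Int) : d.size = 0 ↔ d.keys = [] := by
  obtain ⟨l⟩ := d
  show l.length = 0 ↔ l.map Prod.fst = []
  simp

theorem pvGetD_nonneg (d : PySem.Dict Int Int) (q : Int) (hw : pvWfD d) :
    0 ≤ d.getD q 0 := by
  rcases hg : d.get? q with _ | v
  · rw [PySem.Dict.getD_eq_get?_getD, hg]; rfl
  · have := hw.2 (q, v) (PySem.Dict.mem_items_of_get?_eq_some d hg)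
    rw [PySem.Dict.getD_eq_get?_getD, hg]
    simpa using by omega

theorem pvFillBuy_stop (remaining limit : Int) (d : PySem.Dict Int Int)
    (hng : ¬ (remaining > 0 ∧ d.size ≠ 0)) :
    pvFillBuy remaining limit d = (remaining, d) := by
  rw [pvFillBuy.eq_def, dif_neg hng]

theorem pvFillBuy_eq (remaining limit : Int) (d : PySem.Dict Int Int) (p : Int)
    (hr : remaining > 0) (hsz : d.size ≠ 0)
    (hm : PySem.List.min? d.keys (fun k => k) = some p) :
    pvFillBuy remaining limit d =
      if p > limit then (remaining, d)
      else if remaining < d.getD p 0 then (0, d.insert p (d.getD p 0 - remaining))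
      else pvFillBuy (remaining - d.getD p 0) limit (d.erase p) := by
  rw [pvFillBuy.eq_def, dif_pos ⟨hr, hsz⟩]
  split
  · next heq => rw [hm] at heq; cases heq
  · next p' heq =>
    rw [hm] at heq
    cases heq
    rfl

theorem pvFillSell_stop (remaining limit : Int) (d : PySem.Dict Int Int)
    (hng : ¬ (remaining > 0 ∧ d.size ≠ 0)) :
    pvFillSell remaining limit d = (remaining, d) := by
  rw [pvFillSell.eq_def, dif_neg hng]

theorem pvFillSell_eq (remaining limit : Int) (d : PySem.Dict Int Int) (p : Int)
    (hr : remaining > 0) (hsz : d.size ≠ 0)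
    (hm : PySem.List.max? d.keys (fun k => k) = some p) :
    pvFillSell remaining limit d =
      if p < limit then (remaining, d)
      else if remaining < d.getD p 0 then (0, d.insert p (d.getD p 0 - remaining))
      else pvFillSell (remaining - d.getD p 0) limit (d.erase p) := by
  rw [pvFillSell.eq_def, dif_pos ⟨hr, hsz⟩]
  split
  · next heq => rw [hm] at heq; cases heq
  · next p' heq =>
    rw [hm] at heq
    cases heq
    rfl

theorem pvSellLoop_eq_buyLoop (h : List (Int × Int)) (shares price : Int) :
    pvSellLoop shares h price = pvBuyLoop shares h (-price) := by
  induction h generalizing shares with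
  | nil =>
    rw [pvSellLoop.eq_def, pvBuyLoop.eq_def]
  | cons e t ih =>
    obtain ⟨np, ms⟩ := e
    rw [pvSellLoop.eq_def, pvBuyLoop.eq_def]
    by_cases hsh : shares > 0
    · simp only [if_pos hsh]
      by_cases hacc : -np ≥ price
      · rw [if_pos hacc, if_pos (by omega : np ≤ -price), neg_neg]
        by_cases hlt : shares < ms
        · rw [if_pos hlt, if_pos hlt]
        · rw [if_neg hlt, if_neg hlt, ih]
      · rw [if_neg hacc, if_neg (by omega : ¬ np ≤ -price)]
    · simp only [if_neg hsh]

theorem pvKeys_nil_of_rel (σ : Int → Int) (d : PySem.Dict Int Int)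
    (hrel : pvRel σ [] d) : d.keys = [] := by
  rw [List.eq_nil_iff_forall_not_mem]
  intro p hp
  exact (hrel.2 p).mp hp (pvAgg_nil _)

theorem pvMinKey_rel (e : Int × Int) (t : List (Int × Int)) (d : PySem.Dict Int Int)
    (hrel : pvRel (fun p => p) (e :: t) d) (hs : pvSorted (e :: t)) (hp : pvPos (e :: t)) :
    PySem.List.min? d.keys (fun k => k) = some e.1 := by
  have hmem : e.1 ∈ d.keys := (hrel.2 e.1).mpr (by
    have := pvAgg_pos_of_mem (e :: t) e e.1 hp (by simp) rfl
    show pvAgg (e :: t) e.1 ≠ 0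
    omega)
  rcases hm : PySem.List.min? d.keys (fun k => k) with _ | m
  · rw [PySem.List.min?_eq_none_iff] at hm
    rw [hm] at hmem
    simp at hmem
  · have h1 : m ≤ e.1 := PySem.List.min?_isMin hm e.1 hmem
    obtain ⟨f, hf, hf1⟩ := pvExists_of_agg_ne_zero _ _ ((hrel.2 m).mp (PySem.List.min?_mem hm))
    have hf1' : f.1 = m := hf1
    have h3 : e.1 ≤ f.1 := by
      rw [List.mem_cons] at hf
      rcases hf with hf | hf
      · rw [hf]
      · exact pvSorted_head_min e t hs f hf
    have : m = e.1 := by omega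
    rw [this]

theorem pvMaxKey_rel (e : Int × Int) (t : List (Int × Int)) (d : PySem.Dict Int Int)
    (hrel : pvRel (fun p => -p) (e :: t) d) (hs : pvSorted (e :: t)) (hp : pvPos (e :: t)) :
    PySem.List.max? d.keys (fun k => k) = some (-e.1) := by
  have hmem : -e.1 ∈ d.keys := (hrel.2 (-e.1)).mpr (by
    have := pvAgg_pos_of_mem (e :: t) e e.1 hp (by simp) rfl
    show pvAgg (e :: t) (-(-e.1)) ≠ 0
    rw [neg_neg]
    omega)
  rcases hm : PySem.List.max? d.keys (fun k => k) with _ | m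
  · rw [PySem.List.max?_eq_none_iff] at hm
    rw [hm] at hmem
    simp at hmem
  · have h1 : -e.1 ≤ m := PySem.List.max?_isMax hm (-e.1) hmem
    obtain ⟨f, hf, hf1⟩ := pvExists_of_agg_ne_zero _ _ ((hrel.2 m).mp (PySem.List.max?_mem hm))
    have hf1' : f.1 = -m := hf1
    have h3 : e.1 ≤ f.1 := by
      rw [List.mem_cons] at hf
      rcases hf with hf | hf
      · rw [hf]
      · exact pvSorted_head_min e t hs f hf
    have : m = -e.1 := by omega
    rw [this]

theorem pvFill_rel_buy (n : Nat) :
    ∀ (d : PySem.Dict Int Int) (h : List (Int × Int)) (shares limit : Int),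
    d.size = n → pvSorted h → pvPos h → pvWfD d → pvRel (fun p => p) h d →
    (pvBuyLoop shares h limit).1 = (pvFillBuy shares limit d).1 ∧
    pvSorted (pvBuyLoop shares h limit).2 ∧ pvPos (pvBuyLoop shares h limit).2 ∧
    pvWfD (pvFillBuy shares limit d).2 ∧
    pvRel (fun p => p) (pvBuyLoop shares h limit).2 (pvFillBuy shares limit d).2 := by
  induction n using Nat.strong_induction_on with
  | _ n ih =>
  intro d h shares limit hn hs hp hw hrel
  by_cases hsh : 0 < shares
  case neg =>
    rw [pvBuyLoop_nonpos _ _ _ (by omega), pvFillBuy_stop _ _ _ (fun hc => hsh hc.1)]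
    exact ⟨rfl, hs, hp, hw, hrel⟩
  case pos =>
  cases h with
  | nil =>
    have hk := pvKeys_nil_of_rel _ _ hrel
    have hsz : d.size = 0 := (pvSize_zero_iff d).mpr hk
    rw [pvBuyLoop_nil, pvFillBuy_stop _ _ _ (fun hc => hc.2 hsz)]
    exact ⟨rfl, hs, hp, hw, hrel⟩
  | cons e t =>
    obtain ⟨p0, s0⟩ := e
    have hmin? := pvMinKey_rel (p0, s0) t d hrel hs hp
    have hTpos : 0 < pvAgg ((p0, s0) :: t) p0 :=
      pvAgg_pos_of_mem _ (p0, s0) p0 hp (by simp) rfl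
    have hmem : p0 ∈ d.keys := (hrel.2 p0).mpr (by
      show pvAgg ((p0, s0) :: t) p0 ≠ 0
      omega)
    have hsz : d.size ≠ 0 := by
      intro h0
      rw [(pvSize_zero_iff d).mp h0] at hmem
      simp at hmem
    have hT : d.getD p0 0 = pvAgg ((p0, s0) :: t) p0 := (hrel.1 p0).symm
    have hminall : ∀ f ∈ (p0, s0) :: t, p0 ≤ f.1 := by
      intro f hf
      rw [List.mem_cons] at hf
      rcases hf with hf | hf
      · rw [hf]
      · exact pvSorted_head_min (p0, s0) t hs f hf
    rw [pvFillBuy_eq shares limit d p0 hsh hsz hmin?]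
    by_cases hacc : p0 > limit
    · rw [if_pos hacc, pvBuyLoop_reject _ _ _ _ _ hsh (by omega)]
      exact ⟨rfl, hs, hp, hw, hrel⟩
    · rw [if_neg hacc]
      have hblock := pvBuyLoop_block ((p0, s0) :: t) p0 limit hs hp hminall (by omega) shares hsh
      by_cases hlt : shares < d.getD p0 0
      · rw [if_pos hlt]
        obtain ⟨h', heqA, hs', hp', hagg0, haggq⟩ := hblock.2 (by omega)
        rw [heqA]
        refine ⟨rfl, hs', hp', ⟨PySem.Dict.nodup_keys_insert _ _ _ hw.1, ?_⟩, ?_, ?_⟩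
        · intro kv hkv
          rw [PySem.Dict.mem_items_insert] at hkv
          rcases hkv with hkv | hkv
          · rw [hkv]
            simp only []
            omega
          · exact hw.2 kv hkv.1
        · intro p
          rw [PySem.Dict.getD_insert]
          by_cases hpp : p = p0
          · rw [if_pos hpp, hpp, hagg0, hT]
          · rw [if_neg hpp, haggq p hpp]
            exact hrel.1 p
        · intro p
          rw [PySem.Dict.mem_keys_insert]
          by_cases hpp : p = p0
          · subst hpp
            simp only [hagg0, true_or, true_iff]
            omega
          · simp only [hpp, false_or]
            rw [haggq p hpp]
            exact hrel.2 p
      · rw [if_neg hlt]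
        have heqA := hblock.1 (by omega)
        have harg : shares - d.getD p0 0 = shares - pvAgg ((p0, s0) :: t) p0 := by rw [hT]
        rw [heqA, ← harg]
        have hlt' : (d.erase p0).size < n := hn ▸ pvSizeEraseLt d p0 hmem
        apply ih _ hlt' _ _ _ _ rfl (pvSorted_remove _ _ hs) (pvPos_remove _ _ hp)
          (pvWfD_erase d p0 hw)
        constructor
        · intro p
          rw [pvGetD_erase, pvAgg_remove]
          by_cases hpp : p = p0
          · simp [hpp]
          · simp only [hpp, if_false]
            exact hrel.1 p
        · intro p
          rw [pvMem_keys_erase, pvAgg_remove]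
          by_cases hpp : p = p0
          · simp [hpp]
          · simp only [hpp, if_false, ne_eq, not_false_eq_true, and_true]
            exact hrel.2 p

theorem pvFill_rel_sell (n : Nat) :
    ∀ (d : PySem.Dict Int Int) (h : List (Int × Int)) (shares limit : Int),
    d.size = n → pvSorted h → pvPos h → pvWfD d → pvRel (fun p => -p) h d →
    (pvSellLoop shares h limit).1 = (pvFillSell shares limit d).1 ∧
    pvSorted (pvSellLoop shares h limit).2 ∧ pvPos (pvSellLoop shares h limit).2 ∧
    pvWfD (pvFillSell shares limit d).2 ∧
    pvRel (fun p => -p) (pvSellLoop shares h limit).2 (pvFillSell shares limit d).2 := by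
  induction n using Nat.strong_induction_on with
  | _ n ih =>
  intro d h shares limit hn hs hp hw hrel
  rw [pvSellLoop_eq_buyLoop]
  by_cases hsh : 0 < shares
  case neg =>
    rw [pvBuyLoop_nonpos _ _ _ (by omega), pvFillSell_stop _ _ _ (fun hc => hsh hc.1)]
    exact ⟨rfl, hs, hp, hw, hrel⟩
  case pos =>
  cases h with
  | nil =>
    have hk := pvKeys_nil_of_rel _ _ hrel
    have hsz : d.size = 0 := (pvSize_zero_iff d).mpr hk
    rw [pvBuyLoop_nil, pvFillSell_stop _ _ _ (fun hc => hc.2 hsz)]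
    exact ⟨rfl, hs, hp, hw, hrel⟩
  | cons e t =>
    obtain ⟨p0, s0⟩ := e
    have hmax? := pvMaxKey_rel (p0, s0) t d hrel hs hp
    have hTpos : 0 < pvAgg ((p0, s0) :: t) p0 :=
      pvAgg_pos_of_mem _ (p0, s0) p0 hp (by simp) rfl
    have hmem : -p0 ∈ d.keys := (hrel.2 (-p0)).mpr (by
      show pvAgg ((p0, s0) :: t) (-(-p0)) ≠ 0
      rw [neg_neg]
      omega)
    have hsz : d.size ≠ 0 := by
      intro h0
      rw [(pvSize_zero_iff d).mp h0] at hmem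
      simp at hmem
    have hT : d.getD (-p0) 0 = pvAgg ((p0, s0) :: t) p0 := by
      have hx : pvAgg ((p0, s0) :: t) (-(-p0)) = d.getD (-p0) 0 := hrel.1 (-p0)
      rw [neg_neg] at hx
      exact hx.symm
    have hminall : ∀ f ∈ (p0, s0) :: t, p0 ≤ f.1 := by
      intro f hf
      rw [List.mem_cons] at hf
      rcases hf with hf | hf
      · rw [hf]
      · exact pvSorted_head_min (p0, s0) t hs f hf
    rw [pvFillSell_eq shares limit d (-p0) hsh hsz hmax?]
    by_cases hacc : -p0 < limit
    · rw [if_pos hacc, pvBuyLoop_reject _ _ _ _ _ hsh (by omega)]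
      exact ⟨rfl, hs, hp, hw, hrel⟩
    · rw [if_neg hacc]
      have hblock := pvBuyLoop_block ((p0, s0) :: t) p0 (-limit) hs hp hminall (by omega) shares hsh
      by_cases hlt : shares < d.getD (-p0) 0
      · rw [if_pos hlt]
        obtain ⟨h', heqA, hs', hp', hagg0, haggq⟩ := hblock.2 (by omega)
        rw [heqA]
        refine ⟨rfl, hs', hp', ⟨PySem.Dict.nodup_keys_insert _ _ _ hw.1, ?_⟩, ?_, ?_⟩
        · intro kv hkv
          rw [PySem.Dict.mem_items_insert] at hkv
          rcases hkv with hkv | hkv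
          · rw [hkv]
            simp only []
            omega
          · exact hw.2 kv hkv.1
        · intro p
          rw [PySem.Dict.getD_insert]
          by_cases hpp : p = -p0
          · rw [if_pos hpp, hpp]
            show pvAgg h' (-(-p0)) = d.getD (-p0) 0 - shares
            rw [neg_neg, hagg0, hT]
          · rw [if_neg hpp]
            show pvAgg h' (-p) = d.getD p 0
            rw [haggq (-p) (fun hc => hpp (by omega))]
            exact hrel.1 p
        · intro p
          rw [PySem.Dict.mem_keys_insert]
          by_cases hpp : p = -p0
          · subst hpp
            show _ ↔ pvAgg h' (-(-p0)) ≠ 0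
            rw [neg_neg, hagg0]
            simp only [true_or, true_iff]
            omega
          · simp only [hpp, false_or]
            show p ∈ d.keys ↔ pvAgg h' (-p) ≠ 0
            rw [haggq (-p) (fun hc => hpp (by omega))]
            exact hrel.2 p
      · rw [if_neg hlt]
        have heqA := hblock.1 (by omega)
        have harg : shares - d.getD (-p0) 0 = shares - pvAgg ((p0, s0) :: t) p0 := by rw [hT]
        rw [heqA, harg]
        have hlt' : (d.erase (-p0)).size < n := hn ▸ pvSizeEraseLt d (-p0) hmem
        have hrel' : pvRel (fun p => -p) (pvRemove ((p0, s0) :: t) p0) (d.erase (-p0)) := by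
          constructor
          · intro p
            show pvAgg (pvRemove ((p0, s0) :: t) p0) (-p) = (d.erase (-p0)).getD p 0
            rw [pvGetD_erase, pvAgg_remove]
            by_cases hpp : p = -p0
            · rw [if_pos (by omega : -p = p0), if_pos hpp]
            · rw [if_neg (by omega : ¬ -p = p0), if_neg hpp]
              exact hrel.1 p
          · intro p
            show p ∈ (d.erase (-p0)).keys ↔ pvAgg (pvRemove ((p0, s0) :: t) p0) (-p) ≠ 0
            rw [pvMem_keys_erase, pvAgg_remove]
            by_cases hpp : p = -p0
            · rw [if_pos (by omega : -p = p0)]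
              simp [hpp]
            · rw [if_neg (by omega : ¬ -p = p0)]
              simp only [ne_eq, hpp, not_false_eq_true, and_true]
              exact hrel.2 p
        have hres := ih _ hlt' (d.erase (-p0)) (pvRemove ((p0, s0) :: t) p0)
          (shares - pvAgg ((p0, s0) :: t) p0) limit rfl (pvSorted_remove _ _ hs)
          (pvPos_remove _ _ hp) (pvWfD_erase _ _ hw) hrel'
        rw [pvSellLoop_eq_buyLoop] at hres
        exact hres

theorem pvDeposit_buy (hh : List (Int × Int)) (d : PySem.Dict Int Int) (price rem : Int)
    (hs : pvSorted hh) (hp : pvPos hh) (hw : pvWfD d) (hrel : pvRel (fun p => -p) hh d)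
    (hr : 0 < rem) :
    pvSorted (pvHpush hh (-price, rem)) ∧ pvPos (pvHpush hh (-price, rem)) ∧
    pvWfD (d.insert price (d.getD price 0 + rem)) ∧
    pvRel (fun p => -p) (pvHpush hh (-price, rem)) (d.insert price (d.getD price 0 + rem)) := by
  refine ⟨pvSorted_hpush _ _ hs, pvPos_hpush _ _ hp hr,
    ⟨PySem.Dict.nodup_keys_insert _ _ _ hw.1, ?_⟩, ?_, ?_⟩
  · intro kv hkv
    rw [PySem.Dict.mem_items_insert] at hkv
    rcases hkv with hkv | hkv
    · rw [hkv]
      have := pvGetD_nonneg d price hw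
      simp only []
      omega
    · exact hw.2 kv hkv.1
  · intro p
    show pvAgg (pvHpush hh (-price, rem)) (-p) = _
    rw [PySem.Dict.getD_insert, pvAgg_hpush]
    by_cases hpp : p = price
    · subst hpp
      rw [if_pos rfl, if_pos rfl]
      have := hrel.1 p
      simp only [] at this
      rw [this]
    · rw [if_neg hpp, if_neg (show ¬ ((-price, rem).1 = -p) by simp only []; omega), add_zero]
      exact hrel.1 p
  · intro p
    show p ∈ _ ↔ pvAgg (pvHpush hh (-price, rem)) (-p) ≠ 0
    rw [PySem.Dict.mem_keys_insert, pvAgg_hpush]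
    by_cases hpp : p = price
    · subst hpp
      rw [if_pos rfl]
      have h0 : 0 ≤ pvAgg hh (-p) := pvAgg_nonneg _ _ hp
      constructor
      · intro _; omega
      · intro _; exact Or.inl rfl
    · rw [if_neg (show ¬ ((-price, rem).1 = -p) by simp only []; omega), add_zero]
      simp only [hpp, false_or]
      exact hrel.2 p

theorem pvDeposit_sell (hh : List (Int × Int)) (d : PySem.Dict Int Int) (price rem : Int)
    (hs : pvSorted hh) (hp : pvPos hh) (hw : pvWfD d) (hrel : pvRel (fun p => p) hh d)
    (hr : 0 < rem) :
    pvSorted (pvHpush hh (price, rem)) ∧ pvPos (pvHpush hh (price, rem)) ∧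
    pvWfD (d.insert price (d.getD price 0 + rem)) ∧
    pvRel (fun p => p) (pvHpush hh (price, rem)) (d.insert price (d.getD price 0 + rem)) := by
  refine ⟨pvSorted_hpush _ _ hs, pvPos_hpush _ _ hp hr,
    ⟨PySem.Dict.nodup_keys_insert _ _ _ hw.1, ?_⟩, ?_, ?_⟩
  · intro kv hkv
    rw [PySem.Dict.mem_items_insert] at hkv
    rcases hkv with hkv | hkv
    · rw [hkv]
      have := pvGetD_nonneg d price hw
      simp only []
      omega
    · exact hw.2 kv hkv.1
  · intro p
    show pvAgg (pvHpush hh (price, rem)) p = _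
    rw [PySem.Dict.getD_insert, pvAgg_hpush]
    by_cases hpp : p = price
    · subst hpp
      rw [if_pos rfl, if_pos rfl]
      have := hrel.1 p
      simp only [] at this
      rw [this]
    · rw [if_neg hpp, if_neg (show ¬ ((price, rem).1 = p) by simp only []; omega), add_zero]
      exact hrel.1 p
  · intro p
    show p ∈ _ ↔ pvAgg (pvHpush hh (price, rem)) p ≠ 0
    rw [PySem.Dict.mem_keys_insert, pvAgg_hpush]
    by_cases hpp : p = price
    · subst hpp
      rw [if_pos rfl]
      have h0 : 0 ≤ pvAgg hh p := pvAgg_nonneg _ _ hp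
      constructor
      · intro _; omega
      · intro _; exact Or.inl rfl
    · rw [if_neg (show ¬ ((price, rem).1 = p) by simp only []; omega), add_zero]
      simp only [hpp, false_or]
      exact hrel.2 p

def pvInv (a : List (Int × Int) × List (Int × Int) × Int)
    (b : PySem.Dict Int Int × PySem.Dict Int Int × Int) : Prop :=
  pvSorted a.1 ∧ pvPos a.1 ∧ pvSorted a.2.1 ∧ pvPos a.2.1 ∧ pvWfD b.1 ∧ pvWfD b.2.1 ∧
  pvRel (fun p => -p) a.1 b.1 ∧ pvRel (fun p => p) a.2.1 b.2.1 ∧ a.2.2 = b.2.2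

theorem pvStep_rel (o : Int × Int × String)
    (a : List (Int × Int) × List (Int × Int) × Int)
    (b : PySem.Dict Int Int × PySem.Dict Int Int × Int)
    (hinv : pvInv a b) : pvInv (pvStepA a o) (pvStepB b o) := by
  obtain ⟨h1, h2, h3, h4, h5, h6, h7, h8, h9⟩ := hinv
  simp only [pvStepA, pvStepB]
  by_cases hb : (o.2.2 == "buy") = true
  · rw [if_pos hb, if_pos hb]
    obtain ⟨hf1, hf2, hf3, hf4, hf5⟩ :=
      pvFill_rel_buy b.2.1.size b.2.1 a.2.1 o.2.1 o.1 rfl h3 h4 h6 h8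
    by_cases hr : (pvBuyLoop o.2.1 a.2.1 o.1).1 > 0
    · have hrB : (pvFillBuy o.2.1 o.1 b.2.1).1 > 0 := by rw [← hf1]; exact hr
      rw [if_pos hr, if_pos hrB, ← hf1]
      have hdep := pvDeposit_buy a.1 b.1 o.1 (pvBuyLoop o.2.1 a.2.1 o.1).1 h1 h2 h5 h7 hr
      exact ⟨hdep.1, hdep.2.1, hf2, hf3, hdep.2.2.1, hf4, hdep.2.2.2, hf5, by rw [h9]⟩
    · have hrB : ¬ (pvFillBuy o.2.1 o.1 b.2.1).1 > 0 := by rw [← hf1]; exact hr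
      rw [if_neg hr, if_neg hrB, ← hf1]
      exact ⟨h1, h2, hf2, hf3, h5, hf4, h7, hf5, by rw [h9]⟩
  · rw [if_neg hb, if_neg hb]
    obtain ⟨hf1, hf2, hf3, hf4, hf5⟩ :=
      pvFill_rel_sell b.1.size b.1 a.1 o.2.1 o.1 rfl h1 h2 h5 h7
    by_cases hr : (pvSellLoop o.2.1 a.1 o.1).1 > 0
    · have hrB : (pvFillSell o.2.1 o.1 b.1).1 > 0 := by rw [← hf1]; exact hr
      rw [if_pos hr, if_pos hrB, ← hf1]
      have hdep := pvDeposit_sell a.2.1 b.2.1 o.1 (pvSellLoop o.2.1 a.1 o.1).1 h3 h4 h6 h8 hr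
      exact ⟨hf2, hf3, hdep.1, hdep.2.1, hf4, hdep.2.2.1, hf5, hdep.2.2.2, by rw [h9]⟩
    · have hrB : ¬ (pvFillSell o.2.1 o.1 b.1).1 > 0 := by rw [← hf1]; exact hr
      rw [if_neg hr, if_neg hrB, ← hf1]
      exact ⟨hf2, hf3, h3, h4, hf4, h6, hf5, h8, by rw [h9]⟩

theorem pvFold_rel (orders : List (Int × Int × String)) :
    ∀ (a : List (Int × Int) × List (Int × Int) × Int)
      (b : PySem.Dict Int Int × PySem.Dict Int Int × Int),
    pvInv a b → pvInv (orders.foldl pvStepA a) (orders.foldl pvStepB b) := by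
  induction orders with
  | nil => intro a b h; exact h
  | cons o os ih =>
    intro a b h
    rw [List.foldl_cons, List.foldl_cons]
    exact ih _ _ (pvStep_rel o a b h)

theorem pvInv_init : pvInv ([], [], 0) (PySem.Dict.empty, PySem.Dict.empty, 0) := by
  refine ⟨List.Pairwise.nil, by intro e he; simp at he, List.Pairwise.nil,
    by intro e he; simp at he, ⟨?_, ?_⟩, ⟨?_, ?_⟩, ⟨?_, ?_⟩, ⟨?_, ?_⟩, rfl⟩
  · simp [PySem.Dict.keys_empty]
  · intro kv hkv
    simp [PySem.Dict.empty] at hkv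
  · simp [PySem.Dict.keys_empty]
  · intro kv hkv
    simp [PySem.Dict.empty] at hkv
  · intro p
    rw [pvAgg_nil, PySem.Dict.getD_empty]
  · intro p
    rw [pvAgg_nil]
    simp [PySem.Dict.keys_empty]
  · intro p
    rw [pvAgg_nil, PySem.Dict.getD_empty]
  · intro p
    rw [pvAgg_nil]
    simp [PySem.Dict.keys_empty]

-- ===== VERDICT (by name: the statement is the Claim_ definition above) =====
theorem returnExceutedShares_spec : Claim_equal_returnExceutedShares := by
  intro orders _
  unfold Spec_returnExceutedShares returnExceutedShares returnExceutedShares_alt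
  exact (pvFold_rel orders _ _ pvInv_init).2.2.2.2.2.2.2.2
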